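-- pv_equiv track=rewrite | github.com/Inge299/GraphAnalyzer | plugins/abonent_communications.py | _next_node_id
-- ===== SOURCE A (Python) =====
-- from typing import Any, Dict, List, Optional, Tuple
--
-- def _node_id(node: Dict[str, Any]) -> str:
--     return str(node.get("id") or node.get("node_id") or "")
--
-- def _next_node_id(nodes: List[Dict[str, Any]], prefix: str = "auto_node_") -> str:
--     existing = {_node_id(node) for node in nodes}
--     index = 1
--     while True:
--         candidate = f"{prefix}{index}"
--         if candidate not in existing:
--             return candidate
--         index += 1
-- ===== SOURCE B (Python) =====
-- def _node_id(node):
--     return str(node.get("id") or node.get("node_id") or "")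
--
--
-- def _used_number(node, prefix):
--     """The integer n such that this node's id is prefix+str(n) with n >= 1, else None."""
--     s = _node_id(node)
--     if not s.startswith(prefix):
--         return None
--     suf = s[len(prefix):]
--     if not suf or (len(suf) > 1 and suf[0] == "0"):
--         return None
--     n = 0
--     for ch in suf:
--         if not ("0" <= ch <= "9"):
--             return None
--         n = 10 * n + (ord(ch) - 48)
--     if n < 1:
--         return None
--     return n
--
--
-- def _next_node_id(nodes, prefix="auto_node_"):
--     used = set()
--     for node in nodes:
--         n = _used_number(node, prefix)
--         if n is not None:
--             used.add(n)
--     k = 1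
--     for v in sorted(used):
--         if v == k:
--             k += 1
--         elif v > k:
--             break
--     return prefix + str(k)
-- ===== Notes on version B (the rewrite author's own statement) =====
-- stated objective: alternative
-- what changed: A probes candidate strings auto_node_1, auto_node_2, ... one by one against the set of existing ids until one is missing; B makes a single pass extracting the integer n from every id of the exact form prefix+str(n) (no leading zeros, digits only, n >= 1) into a set, then finds the answer as the first gap starting at 1 in the sorted list of those integers.
import Mathlib
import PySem

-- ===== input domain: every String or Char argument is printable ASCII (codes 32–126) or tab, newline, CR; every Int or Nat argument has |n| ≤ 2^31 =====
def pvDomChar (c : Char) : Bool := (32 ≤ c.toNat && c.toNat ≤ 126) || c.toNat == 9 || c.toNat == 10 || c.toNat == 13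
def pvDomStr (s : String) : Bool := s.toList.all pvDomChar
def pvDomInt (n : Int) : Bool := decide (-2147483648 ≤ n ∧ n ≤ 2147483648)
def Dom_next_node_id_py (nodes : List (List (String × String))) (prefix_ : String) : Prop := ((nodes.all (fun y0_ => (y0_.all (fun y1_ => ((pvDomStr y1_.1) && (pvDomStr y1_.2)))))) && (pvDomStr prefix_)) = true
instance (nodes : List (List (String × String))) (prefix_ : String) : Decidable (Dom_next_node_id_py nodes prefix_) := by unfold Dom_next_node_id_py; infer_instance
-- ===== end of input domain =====

-- B replaces A's probe-strings-one-by-one loop by one pass collecting the used suffix numbers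
-- and a scan of their sorted list for the first gap starting at 1 (objective: alternative).

-- ===== PORT A =====
-- shared helper _node_id: str(node.get("id") or node.get("node_id") or ""), kept as its character list
def pvGetVal (node : List (String × String)) (key : String) : Option String :=
  (node.find? (fun kv => kv.1 == key)).map (·.2)

-- Python truthiness of an optional string: `x or y` keeps x iff it is a nonempty string
def pvTruthy (o : Option String) : Option (List Char) :=
  match o with
  | some s => if s.toList = [] then none else some s.toList
  | none => none

def pvNodeId (node : List (String × String)) : List Char :=
  match pvTruthy (pvGetVal node "id") with
  | some cs => cs
  | none =>
    match pvTruthy (pvGetVal node "node_id") with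
    | some cs => cs
    | none => []

-- the 'while True' probe loop of A; the fuel nodes.length + 1 is proved sufficient below
-- (among the candidates for index 1 .. nodes.length + 1 at least one is unused)
def pvLoopA (existing : PySem.Set (List Char)) (pfx : List Char) : Nat → Int → List Char
  | 0, i => pfx ++ PySem.Int.toChars i
  | fuel + 1, i =>
    let cand := pfx ++ PySem.Int.toChars i
    if cand ∈ existing then pvLoopA existing pfx fuel (i + 1) else cand

def next_node_id_py (nodes : List (List (String × String))) (prefix_ : String) : String :=
  let existing : PySem.Set (List Char) := PySem.Set.ofList (nodes.map pvNodeId)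
  String.ofList (pvLoopA existing prefix_.toList (nodes.length + 1) 1)

-- ===== PORT B =====
-- the digit loop of _used_number: fold the decimal digits into the accumulator, none on a non-digit
def pvParseDigits : List Char → Int → Option Int
  | [], n => some n
  | c :: rest, n =>
    if '0' ≤ c ∧ c ≤ '9' then pvParseDigits rest (10 * n + ((c.toNat : Int) - 48)) else none

-- _used_number(node, prefix)
def pvUsedOf (node : List (String × String)) (pfx : List Char) : Option Int :=
  let s := pvNodeId node
  if PySem.Chars.startswith s pfx then
    let suf := s.drop pfx.length
    if suf = [] ∨ (1 < suf.length ∧ suf.head? = some '0') then none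
    else
      match pvParseDigits suf 0 with
      | some n => if n < 1 then none else some n
      | none => none
  else none

def pvUsed (nodes : List (List (String × String))) (pfx : List Char) : PySem.Set Int :=
  nodes.foldl (fun u nd =>
    match pvUsedOf nd pfx with
    | some n => PySem.Set.add u n
    | none => u) PySem.Set.empty

-- the `for v in sorted(used)` gap scan
def pvScan : List Int → Int → Int
  | [], k => k
  | v :: rest, k => if v = k then pvScan rest (k + 1) else if k < v then k else pvScan rest k

def next_node_id_py_alt (nodes : List (List (String × String))) (prefix_ : String) : String :=
  let k := pvScan (PySem.List.sorted (pvUsed nodes prefix_.toList) (fun x => x)) 1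
  String.ofList (prefix_.toList ++ PySem.Int.toChars k)

-- ===== PRECONDITION & SPEC =====
def Spec_next_node_id_py (nodes : List (List (String × String))) (prefix_ : String) (out : String) : Prop := out = next_node_id_py_alt nodes prefix_
instance (nodes : List (List (String × String))) (prefix_ : String) (out : String) : Decidable (Spec_next_node_id_py nodes prefix_ out) := by unfold Spec_next_node_id_py; infer_instance

-- ===== CLAIM (what is proved, stated in full; the proofs are below) =====
def Claim_equal_next_node_id_py : Prop := ∀ (nodes : List (List (String × String))) (prefix_ : String), Dom_next_node_id_py nodes prefix_ → Spec_next_node_id_py nodes prefix_ (next_node_id_py nodes prefix_)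

-- ===== LEMMAS AND PROOFS =====

-- decimal digit characters
theorem pv_digitChar_digit (d : Nat) (hd : d < 10) :
    '0' ≤ Nat.digitChar d ∧ Nat.digitChar d ≤ '9' ∧ (Nat.digitChar d).toNat = 48 + d := by
  interval_cases d <;> exact ⟨by decide, by decide, by decide⟩

theorem pv_digitChar_of_char (c : Char) (h1 : '0' ≤ c) (h2 : c ≤ '9') :
    Nat.digitChar (c.toNat - 48) = c := by
  have hb : 48 ≤ c.toNat ∧ c.toNat ≤ 57 := ⟨h1, h2⟩
  have h48 : 48 ≤ c.toNat := h1
  have h57 : c.toNat ≤ 57 := h2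
  obtain ⟨_, _, htn⟩ := pv_digitChar_digit (c.toNat - 48) (by omega)
  have key : (Nat.digitChar (c.toNat - 48)).toNat = c.toNat := by omega
  exact Char.ext (UInt32.toNat_inj.mp key)

theorem pv_parse_append (xs : List Char) (c : Char) (a : Int) :
    pvParseDigits (xs ++ [c]) a =
      match pvParseDigits xs a with
      | some v => if '0' ≤ c ∧ c ≤ '9' then some (10 * v + ((c.toNat : Int) - 48)) else none
      | none => none := by
  induction xs generalizing a with
  | nil => simp [pvParseDigits]
  | cons x xs ih =>
    by_cases hx : '0' ≤ x ∧ x ≤ '9'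
    · simp only [List.cons_append, pvParseDigits, if_pos hx]
      exact ih _
    · simp only [List.cons_append, pvParseDigits, if_neg hx]

theorem pv_parse_toDigits (m : Nat) (a : Int) :
    pvParseDigits (Nat.toDigits 10 m) a = some (a * 10 ^ (Nat.toDigits 10 m).length + m) := by
  induction m using Nat.strong_induction_on generalizing a with
  | _ m ih =>
    rcases Nat.lt_or_ge m 10 with hm | hm
    · rw [Nat.toDigits_of_lt_base hm]
      obtain ⟨hd1, hd2, hd3⟩ := pv_digitChar_digit m hm
      simp only [pvParseDigits, if_pos (And.intro hd1 hd2), List.length_singleton]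
      congr 1
      rw [hd3]
      push_cast
      ring
    · rw [Nat.toDigits_of_base_le (by norm_num) hm]
      rw [pv_parse_append, ih (m / 10) (by omega) a]
      obtain ⟨hd1, hd2, hd3⟩ := pv_digitChar_digit (m % 10) (by omega)
      simp only [if_pos (And.intro hd1 hd2), List.length_append, List.length_singleton]
      congr 1
      rw [hd3]
      have h10 : m = 10 * (m / 10) + m % 10 := by omega
      push_cast
      ring_nf
      omega

theorem pv_toDigits_ne_nil (m : Nat) : Nat.toDigits 10 m ≠ [] := by
  rcases Nat.lt_or_ge m 10 with hm | hm
  · rw [Nat.toDigits_of_lt_base hm]; simp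
  · rw [Nat.toDigits_of_base_le (by norm_num) hm]; simp

theorem pv_toDigits_head_ne_zero (m : Nat) (hm : 1 ≤ m) :
    ∀ c, (Nat.toDigits 10 m).head? = some c → c ≠ '0' := by
  induction m using Nat.strong_induction_on with
  | _ m ih =>
    intro c hc
    rcases Nat.lt_or_ge m 10 with h10 | h10
    · rw [Nat.toDigits_of_lt_base h10] at hc
      simp only [List.head?_cons, Option.some.injEq] at hc
      subst hc
      intro h0
      have := congrArg Char.toNat h0
      obtain ⟨_, _, h3⟩ := by
        exact (show '0' ≤ Nat.digitChar m ∧ Nat.digitChar m ≤ '9' ∧ (Nat.digitChar m).toNat = 48 + m from by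
          interval_cases m <;> exact ⟨by decide, by decide, by decide⟩)
      rw [h3] at this
      simp [Char.toNat] at this
      omega
    · rw [Nat.toDigits_of_base_le (by norm_num) h10] at hc
      obtain ⟨d, t, he⟩ := List.exists_cons_of_ne_nil (pv_toDigits_ne_nil (m / 10))
      rw [he] at hc
      simp only [List.cons_append, List.head?_cons, Option.some.injEq] at hc
      subst hc
      exact ih (m / 10) (by omega) (by omega) d (by rw [he]; rfl)

theorem pv_parse_mono (ds : List Char) : ∀ (a n : Int), pvParseDigits ds a = some n → 0 ≤ a →
    a ≤ n := by
  induction ds with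
  | nil => intro a n h _; simp [pvParseDigits] at h; omega
  | cons c rest ih =>
    intro a n h ha
    simp only [pvParseDigits] at h
    split_ifs at h with hc
    · have h48 : 48 ≤ c.toNat := hc.1
      have := ih _ _ h (by omega)
      push_cast at this ⊢
      omega

theorem pv_parse_cons (x : Char) (t : List Char) (a v : Int)
    (h : pvParseDigits (x :: t) a = some v) :
    ('0' ≤ x ∧ x ≤ '9') ∧ pvParseDigits t (10 * a + ((x.toNat : Int) - 48)) = some v := by
  by_cases hxd : '0' ≤ x ∧ x ≤ '9'
  · rw [pvParseDigits, if_pos hxd] at h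
    exact ⟨hxd, h⟩
  · rw [pvParseDigits, if_neg hxd] at h
    cases h

theorem pv_canonical_parse (ds : List Char) :
    ∀ n : Int, pvParseDigits ds 0 = some n → 1 ≤ n →
      (1 < ds.length → ds.head? ≠ some '0') → Nat.toDigits 10 n.toNat = ds := by
  induction ds using List.reverseRecOn with
  | nil =>
    intro n h h1 _
    exfalso
    simp [pvParseDigits] at h
    omega
  | append_singleton xs c ih =>
    intro n h h1 hhead
    rw [pv_parse_append] at h
    cases hxs : pvParseDigits xs 0 with
    | none => rw [hxs] at h; simp at h
    | some v =>
      rw [hxs] at h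
      simp only at h
      split_ifs at h with hc
      · simp only [Option.some.injEq] at h
        have h48 : 48 ≤ c.toNat := hc.1
        have h57 : c.toNat ≤ 57 := hc.2
        cases xs with
        | nil =>
          have hv : v = 0 := by
            have h' := hxs
            simp [pvParseDigits] at h'
            omega
          subst hv
          have hnt : n.toNat = c.toNat - 48 := by omega
          have hlt : n.toNat < 10 := by omega
          rw [Nat.toDigits_of_lt_base hlt, hnt, pv_digitChar_of_char c hc.1 hc.2]
          rfl
        | cons x xs' =>
          obtain ⟨hxd, hrest⟩ := pv_parse_cons x xs' 0 v hxs
          have hx0 : x ≠ '0' := by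
            have := hhead (by simp)
            simpa using this
          have hx48 : 48 ≤ x.toNat := hxd.1
          have hx49 : 49 ≤ x.toNat := by
            rcases Nat.lt_or_ge x.toNat 49 with h' | h'
            · exfalso
              have hx : x.toNat = 48 := by omega
              exact hx0 (Char.ext (UInt32.toNat_inj.mp (hx.trans (by decide : ('0' : Char).toNat = 48).symm)))
            · exact h'
          have hv1 : 1 ≤ v := by
            have := pv_parse_mono xs' _ _ hrest (by push_cast; omega)
            push_cast at this
            omega
          have hih : Nat.toDigits 10 v.toNat = x :: xs' :=
            ih v hxs hv1 (fun _ => by simpa using hx0)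
          have h10 : 10 ≤ n.toNat := by omega
          rw [Nat.toDigits_of_base_le (by norm_num) h10]
          have hdiv : n.toNat / 10 = v.toNat := by omega
          have hmod : n.toNat % 10 = c.toNat - 48 := by omega
          rw [hdiv, hmod, hih, pv_digitChar_of_char c hc.1 hc.2]

theorem pv_toChars_pos (i : Int) (hi : 1 ≤ i) :
    PySem.Int.toChars i = Nat.toDigits 10 i.toNat := by
  rw [PySem.Int.toChars, if_neg (by omega)]

theorem pv_usedOf_iff (node : List (String × String)) (pfx : List Char) (i : Int) (hi : 1 ≤ i) :
    pvUsedOf node pfx = some i ↔ pvNodeId node = pfx ++ PySem.Int.toChars i := by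
  constructor
  · intro h
    simp only [pvUsedOf] at h
    by_cases hsw : PySem.Chars.startswith (pvNodeId node) pfx
    case neg => rw [if_neg hsw] at h; cases h
    rw [if_pos hsw] at h
    by_cases hg : (pvNodeId node).drop pfx.length = [] ∨
        (1 < ((pvNodeId node).drop pfx.length).length ∧ ((pvNodeId node).drop pfx.length).head? = some '0')
    case pos => rw [if_pos hg] at h; cases h
    rw [if_neg hg] at h
    cases hp : pvParseDigits ((pvNodeId node).drop pfx.length) 0 with
    | none => rw [hp] at h; cases h
    | some n =>
      rw [hp] at h
      simp only at h
      by_cases hn : n < 1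
      · rw [if_pos hn] at h; cases h
      · rw [if_neg hn] at h
        injection h with h
        subst h
        obtain ⟨t, ht⟩ := (PySem.Chars.startswith_iff (pvNodeId node) pfx).mp hsw
        have hsu : (pvNodeId node).drop pfx.length = t := by rw [← ht, List.drop_left]
        have hcanon := pv_canonical_parse ((pvNodeId node).drop pfx.length) n hp (by omega)
          (fun hlen hh => hg (Or.inr ⟨hlen, hh⟩))
        rw [pv_toChars_pos n (by omega), hcanon, hsu]
        exact ht.symm
  · intro h
    have hX : PySem.Int.toChars i = Nat.toDigits 10 i.toNat := pv_toChars_pos i hi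
    have hsw : PySem.Chars.startswith (pvNodeId node) pfx = true := by
      rw [h]
      exact (PySem.Chars.startswith_iff _ _).mpr ⟨PySem.Int.toChars i, rfl⟩
    have hdrop : (pvNodeId node).drop pfx.length = PySem.Int.toChars i := by
      rw [h, List.drop_left]
    have hne : PySem.Int.toChars i ≠ [] := by rw [hX]; exact pv_toDigits_ne_nil _
    have hhead : ¬(1 < (PySem.Int.toChars i).length ∧ (PySem.Int.toChars i).head? = some '0') := by
      rintro ⟨-, hh⟩
      rw [hX] at hh
      exact pv_toDigits_head_ne_zero i.toNat (by omega) '0' hh rfl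
    have hp : pvParseDigits (PySem.Int.toChars i) 0 = some i := by
      rw [hX, pv_parse_toDigits i.toNat 0]
      simp [Int.toNat_of_nonneg (by omega : (0:Int) ≤ i)]
    simp only [pvUsedOf, hsw, if_pos, hdrop]
    rw [if_neg (by rintro (h' | h') ; exact hne h'; exact hhead h'), hp]
    simp only
    rw [if_neg (by omega)]

theorem pv_mem_used_aux (nodes : List (List (String × String))) (pfx : List Char) (i : Int) :
    ∀ u : PySem.Set Int,
      (i ∈ nodes.foldl (fun u nd =>
        match pvUsedOf nd pfx with
        | some n => PySem.Set.add u n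
        | none => u) u) ↔ i ∈ u ∨ ∃ nd ∈ nodes, pvUsedOf nd pfx = some i := by
  induction nodes with
  | nil => intro u; simp
  | cons nd nds ih =>
    intro u
    simp only [List.foldl_cons]
    cases hnd : pvUsedOf nd pfx with
    | none =>
      rw [ih u]
      constructor
      · rintro (hu | ⟨x, hx, he⟩)
        · exact Or.inl hu
        · exact Or.inr ⟨x, List.mem_cons_of_mem _ hx, he⟩
      · rintro (hu | ⟨x, hx, he⟩)
        · exact Or.inl hu
        · rcases List.mem_cons.mp hx with rfl | hx'
          · rw [hnd] at he; cases he
          · exact Or.inr ⟨x, hx', he⟩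
    | some n =>
      rw [ih (PySem.Set.add u n)]
      rw [PySem.Set.mem_add]
      constructor
      · rintro ((hu | rfl) | ⟨x, hx, he⟩)
        · exact Or.inl hu
        · exact Or.inr ⟨nd, List.mem_cons_self, hnd⟩
        · exact Or.inr ⟨x, List.mem_cons_of_mem _ hx, he⟩
      · rintro (hu | ⟨x, hx, he⟩)
        · exact Or.inl (Or.inl hu)
        · rcases List.mem_cons.mp hx with rfl | hx'
          · rw [hnd] at he; injection he with he; exact Or.inl (Or.inr he.symm)
          · exact Or.inr ⟨x, hx', he⟩

theorem pv_mem_used (nodes : List (List (String × String))) (pfx : List Char) (i : Int) :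
    i ∈ pvUsed nodes pfx ↔ ∃ nd ∈ nodes, pvUsedOf nd pfx = some i := by
  rw [pvUsed, pv_mem_used_aux]
  simp [PySem.Set.empty]

theorem pv_used_nodup_aux (nodes : List (List (String × String))) (pfx : List Char) :
    ∀ u : PySem.Set Int, u.Nodup →
      (nodes.foldl (fun u nd =>
        match pvUsedOf nd pfx with
        | some n => PySem.Set.add u n
        | none => u) u).Nodup := by
  induction nodes with
  | nil => intro u hu; exact hu
  | cons nd nds ih =>
    intro u hu
    simp only [List.foldl_cons]
    cases pvUsedOf nd pfx with
    | none => exact ih u hu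
    | some n => exact ih (PySem.Set.add u n) (PySem.Set.nodup_add u n hu)

theorem pv_used_nodup (nodes : List (List (String × String))) (pfx : List Char) :
    (pvUsed nodes pfx).Nodup := pv_used_nodup_aux nodes pfx _ List.nodup_nil

theorem pv_used_length_aux (nodes : List (List (String × String))) (pfx : List Char) :
    ∀ u : PySem.Set Int,
      (nodes.foldl (fun u nd =>
        match pvUsedOf nd pfx with
        | some n => PySem.Set.add u n
        | none => u) u).length ≤ u.length + nodes.length := by
  induction nodes with
  | nil => intro u; simp
  | cons nd nds ih =>
    intro u
    simp only [List.foldl_cons, List.length_cons]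
    cases pvUsedOf nd pfx with
    | none => exact le_trans (ih u) (by omega)
    | some n =>
      have h1 : (PySem.Set.add u n).length ≤ u.length + 1 := by
        rw [PySem.Set.add_eq_ite]
        split_ifs
        · omega
        · simp
      exact le_trans (ih (PySem.Set.add u n)) (by omega)

theorem pv_used_length (nodes : List (List (String × String))) (pfx : List Char) :
    (pvUsed nodes pfx).length ≤ nodes.length := by
  have := pv_used_length_aux nodes pfx PySem.Set.empty
  simpa [PySem.Set.empty] using this

theorem pv_scan_spec (L : List Int) (hL : L.Pairwise (· < ·)) :
    ∀ k, k ≤ pvScan L k ∧ pvScan L k ∉ L ∧ ∀ j, k ≤ j → j < pvScan L k → j ∈ L := by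
  induction L with
  | nil => intro k; exact ⟨le_refl k, by simp, fun j h1 h2 => by simp [pvScan] at h2; omega⟩
  | cons v rest ih =>
    have hrest : rest.Pairwise (· < ·) := hL.of_cons
    have hv : ∀ w ∈ rest, v < w := fun w hw => List.rel_of_pairwise_cons hL hw
    intro k
    simp only [pvScan]
    split_ifs with h1 h2
    · subst h1
      obtain ⟨hle, hnot, hall⟩ := ih hrest (v + 1)
      refine ⟨by omega, ?_, ?_⟩
      · simp only [List.mem_cons, not_or]
        exact ⟨by omega, hnot⟩
      · intro j hj1 hj2
        rcases eq_or_lt_of_le hj1 with he | hlt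
        · simp [← he]
        · exact List.mem_cons_of_mem _ (hall j (by omega) hj2)
    · refine ⟨le_refl k, ?_, fun j h1 h2 => by omega⟩
      simp only [List.mem_cons, not_or]
      exact ⟨by omega, fun hk => by have := hv k hk; omega⟩
    · obtain ⟨hle, hnot, hall⟩ := ih hrest k
      refine ⟨hle, ?_, ?_⟩
      · simp only [List.mem_cons, not_or]
        exact ⟨by omega, hnot⟩
      · intro j hj1 hj2
        exact List.mem_cons_of_mem _ (hall j hj1 hj2)

theorem pv_loopA_spec (ex : PySem.Set (List Char)) (pfx : List Char) :
    ∀ (fuel : Nat) (i m : Int), i ≤ m → m - i < (fuel : Int) →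
      (pfx ++ PySem.Int.toChars m) ∉ ex →
      (∀ j, i ≤ j → j < m → (pfx ++ PySem.Int.toChars j) ∈ ex) →
      pvLoopA ex pfx fuel i = pfx ++ PySem.Int.toChars m := by
  intro fuel
  induction fuel with
  | zero => intro i m h1 h2 _ _; exfalso; push_cast at h2; omega
  | succ f ih =>
    intro i m h1 h2 hfree hall
    simp only [pvLoopA]
    by_cases he : i = m
    · subst he
      rw [if_neg hfree]
    · rw [if_pos (hall i le_rfl (by omega))]
      exact ih (i + 1) m (by omega) (by push_cast at h2 ⊢; omega) hfree
        (fun j hj1 hj2 => hall j (by omega) hj2)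

theorem pv_nodup_subset_length (l l' : List Int) (h : l.Nodup) (hs : l ⊆ l') :
    l.length ≤ l'.length := by
  classical
  calc l.length = l.toFinset.card := (List.toFinset_card_of_nodup h).symm
    _ ≤ l'.toFinset.card := Finset.card_le_card (fun x hx => by
        simp only [List.mem_toFinset] at *; exact hs hx)
    _ ≤ l'.length := l'.toFinset_card_le

-- ===== VERDICT (by name: the statement is the Claim_ definition above) =====
theorem next_node_id_py_spec : Claim_equal_next_node_id_py := by
  intro nodes prefix_ _
  unfold Spec_next_node_id_py
  simp only [next_node_id_py, next_node_id_py_alt]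
  set P := prefix_.toList with hP
  set U := pvUsed nodes P with hU
  set L := PySem.List.sorted U (fun x => x) with hL
  set m := pvScan L 1 with hm
  -- L is strictly increasing
  have hperm : L.Perm U := PySem.List.sorted_perm U (fun x => x) false
  have hndL : L.Nodup := hperm.nodup_iff.mpr (pv_used_nodup nodes P)
  have hle : L.Pairwise (· ≤ ·) := by
    simpa using PySem.List.sorted_pairwise U (fun x => x)
  have hpw : L.Pairwise (· < ·) := (hle.and hndL).imp (fun h => lt_of_le_of_ne h.1 h.2)
  obtain ⟨h1m, hnotm, hallm⟩ := pv_scan_spec L hpw 1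
  -- membership transfer: i ∈ existing candidates ↔ i ∈ L  (for i ≥ 1)
  have hkey : ∀ i : Int, 1 ≤ i →
      ((P ++ PySem.Int.toChars i) ∈ PySem.Set.ofList (nodes.map pvNodeId) ↔ i ∈ L) := by
    intro i hi
    rw [PySem.Set.mem_ofList, hperm.mem_iff, pv_mem_used]
    constructor
    · intro hmem
      obtain ⟨nd, hnd, he⟩ := List.mem_map.mp hmem
      exact ⟨nd, hnd, (pv_usedOf_iff nd P i hi).mpr he⟩
    · rintro ⟨nd, hnd, he⟩
      exact List.mem_map.mpr ⟨nd, hnd, (pv_usedOf_iff nd P i hi).mp he⟩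
  -- bound: m - 1 ≤ |L| ≤ |nodes|
  have hbound : m - 1 < ((nodes.length + 1 : Nat) : Int) := by
    have hsub : ((List.range (m - 1).toNat).map (fun t : Nat => ((t : Int) + 1))) ⊆ L := by
      intro j hj
      obtain ⟨t, ht, rfl⟩ := List.mem_map.mp hj
      rw [List.mem_range] at ht
      exact hallm _ (by omega) (by omega)
    have hndW : ((List.range (m - 1).toNat).map (fun t : Nat => ((t : Int) + 1))).Nodup :=
      List.Nodup.map (fun a b hab => by omega) (List.nodup_range)
    have hlen := pv_nodup_subset_length _ _ hndW hsub
    rw [List.length_map, List.length_range] at hlen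
    have hLU : L.length = U.length := hperm.length_eq
    have hUn := pv_used_length nodes P
    rw [← hU] at hUn
    push_cast
    omega
  rw [pv_loopA_spec _ P (nodes.length + 1) 1 m h1m hbound
    (fun hmem => hnotm ((hkey m h1m).mp hmem))
    (fun j hj1 hj2 => (hkey j hj1).mpr (hallm j hj1 hj2))]
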